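-- pv_equiv track=rewrite | github.com/MarioCalvarro/ACOM | prog6.py | ifft_adaptado
-- ===== SOURCE A (Python) =====
-- def rotar(f, t):
--     """
--     Realiza la rotación de los elementos del polinomio f en t posiciones, si un valor se sale de rango, entonces se invierte cambiando su rango
--     """
--     if t == 0:
--         return f
--
--     n = len(f)
--     res = [0] * n
--
--     for i in range(n):
--         if i + t >= n or i + t < 0:
--             res[( i + t ) % n] = -f[i]
--         else:
--             res[( i + t ) % n] = f[i]
--
--     return res
--
-- def sumar_vectores(f, g, p):
--     """
--     Dados dos vectores f y g realizamos la suma de ambos en módulo p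
--     """
--     h = []
--     for i in range(len(f)):
--         h += [(f[i] + g[i]) % p]
--     return h
--
-- def restar_vectores(f, g, p):
--     """
--     Dados dos vectores f y g realizamos la resta de ambos en módulo p
--     """
--     h = []
--     for i in range(len(f)):
--         h += [(f[i] - g[i]) % p]
--     return h
--
-- def fft_adaptado(f, xi, p):
--     """
--     Algoritmo de Cooley-Tuckey para calcular DFT_n(p) donde n = len(p) debe ser una potencia de 2 y xi debe ser una raíz n-ésima primitiva de la unidad
--     """
--     n = len(f)
--     if n == 1:
--         return f
--
--     p_even = [0] * (n//2)
--     p_odd  = [0] * (n//2)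
--     for i in range(n//2):
--         p_even[i] = f[2*i]
--         p_odd[i]  = f[2*i+1]
--
--     a_even = fft_adaptado(p_even, xi*2, p)
--     a_odd  = fft_adaptado(p_odd,  xi*2, p)
--
--     a = [0] * n
--     for i in range(n//2):
--         rotar_impar = rotar(a_odd[i], i*xi)
--
--         a[i] = sumar_vectores(a_even[i], rotar_impar, p)
--         a[i + n // 2] = restar_vectores(a_even[i], rotar_impar, p)
--
--     return a
--
-- def ifft_adaptado(a, xi, p):
--     """
--     Esta función calcula la transformada inversa utilizando que D(xi)^(-1) = 1/n * D(1/xi)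
--     """
--     n1 = len(a[0])
--     n2 = len(a)
--     transformado = fft_adaptado(a, -xi, p)
--     inversa = pow(n2, -1, p)
--
--     for i in range(n2):
--         for j in range(n1):
--             transformado[i][j] = (transformado[i][j] * inversa) % p
--
--     return transformado
-- ===== SOURCE B (Python) =====
-- def rotar(f, t):
--     """Negacyclic-style rotation by t with a single sign flip on wrap (gather form)."""
--     if t == 0:
--         return f
--     n = len(f)
--     return [f[i] if 0 <= i + t < n else -f[i]
--             for i in ((j - t) % n for j in range(n))]
--
-- def sumar_vectores(f, g, p):
--     return [(x + y) % p for x, y in zip(f, g)]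
--
-- def restar_vectores(f, g, p):
--     return [(x - y) % p for x, y in zip(f, g)]
--
-- def fft_iterativo(f, xi, p):
--     """Iterative Cooley-Tukey: bit-reversal reorder, then log2(n) butterfly stages."""
--     n = len(f)
--     rev = [0]
--     while 0 < len(rev) < n:
--         rev = [2 * r for r in rev] + [2 * r + 1 for r in rev]
--     a = [f[r] for r in rev]
--     m = 1
--     while m < n:
--         step = xi * (n // (2 * m))
--         nxt = []
--         rest = a
--         while rest:
--             u, v, rest = rest[:m], rest[m:2 * m], rest[2 * m:]
--             rs = [rotar(y, i * step) for i, y in enumerate(v)]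
--             nxt += [sumar_vectores(x, r, p) for x, r in zip(u, rs)] \
--                  + [restar_vectores(x, r, p) for x, r in zip(u, rs)]
--         a = nxt
--         m *= 2
--     return a
--
-- def ifft_adaptado(a, xi, p):
--     inv = pow(len(a), -1, p)
--     return [[(c * inv) % p for c in row] for row in fft_iterativo(a, -xi, p)]
-- ===== Notes on version B (the rewrite author's own statement) =====
-- stated objective: alternative
-- what changed: fft_adaptado's recursive Cooley-Tukey is replaced by an iterative FFT: a bit-reversal permutation (built by doubling) followed by log2(n) butterfly stages over blocks, with slice/zip-based vector helpers and a gather-style rotar instead of A's scatter loop; ifft then maps the modular inverse over the result instead of mutating in place.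
-- outside the precondition, e.g. on ifft_adaptado([[1], [2, 3]], 1, 3): A returns [[0], [1]], B returns [[0], [1]]; on ifft_adaptado([[], [], []], 1, 5): A returns [[], [], 0], B raises IndexError
import Mathlib
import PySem

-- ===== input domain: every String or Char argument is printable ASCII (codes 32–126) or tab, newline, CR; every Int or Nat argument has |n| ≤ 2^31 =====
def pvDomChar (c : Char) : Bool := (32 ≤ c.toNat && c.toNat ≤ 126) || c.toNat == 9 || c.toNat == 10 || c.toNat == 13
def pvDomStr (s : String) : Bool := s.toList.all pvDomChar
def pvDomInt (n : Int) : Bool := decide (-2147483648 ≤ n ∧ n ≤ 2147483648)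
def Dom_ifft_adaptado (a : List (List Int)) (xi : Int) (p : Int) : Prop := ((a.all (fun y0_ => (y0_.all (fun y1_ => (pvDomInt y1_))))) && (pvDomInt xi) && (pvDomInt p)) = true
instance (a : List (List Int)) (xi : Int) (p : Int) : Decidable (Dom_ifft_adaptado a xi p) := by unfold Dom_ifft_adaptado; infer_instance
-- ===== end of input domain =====

-- B re-implements the FFT iteratively (bit-reversal reorder + butterfly stages) instead of A's recursion;
-- objective: alternative decomposition, same asymptotic cost. Return-value equivalence only: when len(a) == 1,
-- Python A mutates the rows of its argument in place (fft returns the input list itself); B never mutates.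
-- ===== PORT A =====

-- pow(n2, -1, p) (a Python built-in used identically by A and B): modular inverse via extended gcd;
-- exact whenever the inverse exists (guaranteed by Pre_: p nonzero and odd unless len(a) == 1)
def pyModInv (n p : Int) : Int := PySem.Int.mod (Nat.xgcd n.toNat p.natAbs).1 p

def rotarA (f : List Int) (t : Int) : List Int :=
  if t = 0 then f
  else
    let n := f.length
    (List.range n).foldl (fun res (i : Nat) =>
      res.set (PySem.Int.mod ((i : Int) + t) (n : Int)).toNat
        (if (n : Int) ≤ (i : Int) + t ∨ (i : Int) + t < 0 then -(f.getD i 0) else f.getD i 0))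
      (List.replicate n 0)

def sumarA (f g : List Int) (p : Int) : List Int :=
  (List.range f.length).foldl (fun h i => h ++ [PySem.Int.mod (f.getD i 0 + g.getD i 0) p]) []

def restarA (f g : List Int) (p : Int) : List Int :=
  (List.range f.length).foldl (fun h i => h ++ [PySem.Int.mod (f.getD i 0 - g.getD i 0) p]) []

def fftA (f : List (List Int)) (xi : Int) (p : Int) : List (List Int) :=
  let n := f.length
  if n = 1 then f
  else if n = 0 then f
  else
    let pe := (List.range (n/2)).map (fun i => f.getD (2*i) [])
    let po := (List.range (n/2)).map (fun i => f.getD (2*i+1) [])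
    let ae := fftA pe (xi*2) p
    let ao := fftA po (xi*2) p
    (List.range (n/2)).foldl (fun a i =>
      let ri := rotarA (ao.getD i []) ((i : Int) * xi)
      (a.set i (sumarA (ae.getD i []) ri p)).set (i + n/2) (restarA (ae.getD i []) ri p))
      (List.replicate n ([] : List Int))
termination_by f.length
decreasing_by all_goals (simp; omega)

def ifft_adaptado (a : List (List Int)) (xi : Int) (p : Int) : List (List Int) :=
  let n1 := (a.getD 0 []).length
  let n2 := a.length
  let tr := fftA a (-xi) p
  let inv := pyModInv (n2 : Int) p
  (List.range n2).foldl (fun t i =>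
    t.set i ((List.range n1).foldl (fun row j =>
      row.set j (PySem.Int.mod (row.getD j 0 * inv) p)) (t.getD i []))) tr


-- ===== PORT B =====
def rotarB (f : List Int) (t : Int) : List Int :=
  if t = 0 then f
  else
    let n := f.length
    (List.range n).map (fun (j : Nat) =>
      let i := (PySem.Int.mod ((j : Int) - t) (n : Int)).toNat
      if 0 ≤ (i : Int) + t ∧ (i : Int) + t < (n : Int) then f.getD i 0 else -(f.getD i 0))

def sumarB (f g : List Int) (p : Int) : List Int :=
  (f.zip g).map (fun xy => PySem.Int.mod (xy.1 + xy.2) p)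

def restarB (f g : List Int) (p : Int) : List Int :=
  (f.zip g).map (fun xy => PySem.Int.mod (xy.1 - xy.2) p)

def revLoop (rev : List Nat) (n : Nat) : List Nat :=
  if h : 0 < rev.length ∧ rev.length < n then
    revLoop (rev.map (fun r => 2*r) ++ rev.map (fun r => 2*r+1)) n
  else rev
termination_by n - rev.length
decreasing_by simp; omega

def blocksB (rest : List (List Int)) (m : Nat) (step p : Int) : List (List Int) :=
  if _h : rest = [] ∨ m = 0 then []
  else
    let u := rest.take m
    let v := (rest.drop m).take m
    let rs := v.zipIdx.map (fun yi => rotarB yi.1 ((yi.2 : Int) * step))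
    ((u.zip rs).map (fun xr => sumarB xr.1 xr.2 p) ++
     (u.zip rs).map (fun xr => restarB xr.1 xr.2 p)) ++ blocksB (rest.drop (2*m)) m step p
termination_by rest.length
decreasing_by
  rcases rest with _ | ⟨x, rest⟩
  · simp at _h
  · simp; omega

def stagesB (a : List (List Int)) (n m : Nat) (xi p : Int) : List (List Int) :=
  if h : 0 < m ∧ m < n then
    stagesB (blocksB a m (xi * ((n/(2*m) : Nat) : Int)) p) n (2*m) xi p
  else a
termination_by n - m
decreasing_by omega

def fftB (f : List (List Int)) (xi : Int) (p : Int) : List (List Int) :=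
  let n := f.length
  let rev := revLoop [0] n
  let a := rev.map (fun r => f.getD r [])
  stagesB a n 1 xi p

def ifft_adaptado_alt (a : List (List Int)) (xi : Int) (p : Int) : List (List Int) :=
  let inv := pyModInv (a.length : Int) p
  (fftB a (-xi) p).map (fun row => row.map (fun c => PySem.Int.mod (c * inv) p))

-- ===== PRECONDITION & SPEC =====
-- Pre_ is the natural domain of the routine: a is a nonempty list whose length is a power of two (A's
-- Cooley-Tukey recursion silently leaves integer-0 placeholder rows otherwise, which then raise TypeError,
-- or recurses forever on length 0), all rows have equal length, and the modular inverse pow(len(a),-1,p)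
-- exists (p = 0 or p even with len(a) > 1 raise ValueError).  Pre_ also excludes ragged inputs (rows of
-- unequal length), on which A either raises IndexError or silently truncates rows depending on which row
-- of a combined pair is longer -- an accidental corner no caller could rely on.
def Pre_ifft_adaptado (a : List (List Int)) (xi : Int) (p : Int) : Prop :=
  a ≠ [] ∧ a.length ∣ 2^31 ∧ (∀ r ∈ a, r.length = (a.headD []).length) ∧ p ≠ 0 ∧
    (a.length = 1 ∨ PySem.Int.mod p 2 = 1)
instance (a : List (List Int)) (xi : Int) (p : Int) : Decidable (Pre_ifft_adaptado a xi p) := by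
  unfold Pre_ifft_adaptado; infer_instance

def pvWitness_ifft_adaptado : List (List Int) × Int × Int := ([[1,2],[3,4]], 1, 5)

def Spec_ifft_adaptado (a : List (List Int)) (xi : Int) (p : Int) (out : List (List Int)) : Prop := out = ifft_adaptado_alt a xi p
instance (a : List (List Int)) (xi : Int) (p : Int) (out : List (List Int)) : Decidable (Spec_ifft_adaptado a xi p out) := by unfold Spec_ifft_adaptado; infer_instance

-- ===== CLAIM (what is proved, stated in full; the proofs are below) =====
def Claim_equal_ifft_adaptado : Prop := ∀ (a : List (List Int)) (xi : Int) (p : Int), Dom_ifft_adaptado a xi p → Pre_ifft_adaptado a xi p → Spec_ifft_adaptado a xi p (ifft_adaptado a xi p)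

-- ===== LEMMAS AND PROOFS =====

lemma mod_toNat_cast {x n : Int} (hn : 0 < n) :
    ((PySem.Int.mod x n).toNat : Int) = PySem.Int.mod x n :=
  Int.toNat_of_nonneg (PySem.Int.mod_nonneg x hn)

lemma set_map_range {α : Type} (n k : Nat) (g : Nat → α) (v : α) :
    ((List.range n).map g).set k v = (List.range n).map (fun j => if j = k then v else g j) := by
  apply List.ext_getElem
  · simp
  · intro i hi hi2
    simp only [List.getElem_set, List.getElem_map, List.getElem_range] at *
    by_cases h : i = k
    · simp [h]
    · rw [if_neg (by omega), if_neg h]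

lemma mod_shift {n : Int} (hn : 0 < n) (a s : Int) (h0 : 0 ≤ a) (h1 : a < n) :
    PySem.Int.mod (((PySem.Int.mod (a + s) n).toNat : Int) - s) n = a := by
  rw [mod_toNat_cast hn, PySem.Int.mod_eq_emod_of_pos hn, PySem.Int.mod_eq_emod_of_pos hn]
  rw [sub_eq_add_neg, Int.emod_add_emod, add_neg_cancel_right, Int.emod_eq_of_lt h0 h1]

lemma scatter_aux (n : Nat) (hn : 0 < n) (t : Int) (val : Nat → Int) :
    ∀ m, m ≤ n →
    (List.range m).foldl (fun res (i : Nat) =>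
      res.set (PySem.Int.mod ((i : Int) + t) (n : Int)).toNat (val i)) (List.replicate n 0)
    = (List.range n).map (fun (j : Nat) =>
        if (PySem.Int.mod ((j : Int) - t) (n : Int)).toNat < m
        then val ((PySem.Int.mod ((j : Int) - t) (n : Int)).toNat) else 0) := by
  have hnz : (0:Int) < (n:Int) := by exact_mod_cast hn
  intro m hm
  induction m with
  | zero =>
    apply List.ext_getElem <;> simp
  | succ m ih =>
    rw [List.range_succ, List.foldl_append, ih (by omega)]
    simp only [List.foldl_cons, List.foldl_nil]
    have hσlt : (PySem.Int.mod ((m : Int) + t) (n : Int)).toNat < n := by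
      have := PySem.Int.mod_lt ((m : Int) + t) hnz
      have := PySem.Int.mod_nonneg ((m : Int) + t) hnz
      omega
    rw [set_map_range n _]
    apply List.map_congr_left
    intro j hj
    have hjn : j < n := List.mem_range.mp hj
    have hts : ∀ (i : Nat), i < n →
        (PySem.Int.mod (((PySem.Int.mod ((i : Int) + t) (n : Int)).toNat : Int) - t) (n : Int)).toNat = i := by
      intro i hi
      rw [mod_shift hnz (i : Int) t (by omega) (by exact_mod_cast hi)]
      omega
    by_cases he : j = (PySem.Int.mod ((m : Int) + t) (n : Int)).toNat
    · have hτ : (PySem.Int.mod ((j : Int) - t) (n : Int)).toNat = m := by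
        rw [he]; exact hts m (by omega)
      rw [if_pos he, if_pos (by omega)]
      rw [hτ]
    · have hτ : (PySem.Int.mod ((j : Int) - t) (n : Int)).toNat ≠ m := by
        intro hc
        apply he
        have h2 := mod_shift hnz (j : Int) (-t) (by omega) (by exact_mod_cast hjn)
        rw [sub_neg_eq_add] at h2
        have h4 : (PySem.Int.mod (((PySem.Int.mod ((j : Int) - t) (n : Int)).toNat : Int) + t) (n : Int)).toNat = j := by
          rw [show ((j:Int) - t) = ((j:Int) + -t) by ring, h2]
          omega
        rw [← hc, h4]
      rw [if_neg he]
      by_cases hlt : (PySem.Int.mod ((j : Int) - t) (n : Int)).toNat < m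
      · rw [if_pos hlt, if_pos (by omega)]
      · rw [if_neg hlt, if_neg (by omega)]

lemma rotar_eq (f : List Int) (t : Int) : rotarA f t = rotarB f t := by
  by_cases ht : t = 0
  · simp [rotarA, rotarB, ht]
  rcases Nat.eq_zero_or_pos f.length with h0 | hpos
  · simp [rotarA, rotarB, ht, h0]
  · have hnz : (0:Int) < (f.length:Int) := by exact_mod_cast hpos
    rw [rotarA, rotarB, if_neg ht, if_neg ht]
    rw [scatter_aux f.length hpos t _ f.length (le_refl _)]
    apply List.map_congr_left
    intro j hj
    have hτlt : (PySem.Int.mod ((j : Int) - t) (f.length : Int)).toNat < f.length := by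
      have := PySem.Int.mod_lt ((j : Int) - t) hnz
      have := PySem.Int.mod_nonneg ((j : Int) - t) hnz
      omega
    rw [if_pos hτlt]
    set i := (PySem.Int.mod ((j : Int) - t) (f.length : Int)).toNat with hi
    by_cases hc : (f.length : Int) ≤ (i : Int) + t ∨ (i : Int) + t < 0
    · rw [if_pos hc, if_neg (by omega)]
    · rw [if_neg hc, if_pos (by omega)]

lemma length_rotarB (f : List Int) (t : Int) : (rotarB f t).length = f.length := by
  by_cases ht : t = 0 <;> simp [rotarB, ht]

lemma sumarA_eq_map (f g : List Int) (p : Int) :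
    sumarA f g p = (List.range f.length).map (fun i => PySem.Int.mod (f.getD i 0 + g.getD i 0) p) := by
  rw [sumarA, PySem.List.foldl_append_singleton_eq_map]
  simp

lemma restarA_eq_map (f g : List Int) (p : Int) :
    restarA f g p = (List.range f.length).map (fun i => PySem.Int.mod (f.getD i 0 - g.getD i 0) p) := by
  rw [restarA, PySem.List.foldl_append_singleton_eq_map]
  simp

lemma sumar_eq (f g : List Int) (p : Int) (h : f.length ≤ g.length) :
    sumarA f g p = sumarB f g p := by
  rw [sumarA_eq_map, sumarB]
  apply List.ext_getElem
  · simp; omega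
  · intro i hi hi2
    simp only [List.getElem_map, List.getElem_range, List.getElem_zip]
    have hif : i < f.length := by simp at hi; omega
    rw [List.getD_eq_getElem f 0 hif, List.getD_eq_getElem g 0 (by omega)]

lemma restar_eq (f g : List Int) (p : Int) (h : f.length ≤ g.length) :
    restarA f g p = restarB f g p := by
  rw [restarA_eq_map, restarB]
  apply List.ext_getElem
  · simp; omega
  · intro i hi hi2
    simp only [List.getElem_map, List.getElem_range, List.getElem_zip]
    have hif : i < f.length := by simp at hi; omega
    rw [List.getD_eq_getElem f 0 hif, List.getD_eq_getElem g 0 (by omega)]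

-- the combine loop of fftA in closed form (n = 2*h slots, all overwritten)
lemma combine_eq (h : Nat) (S D : Nat → List Int) :
    (List.range h).foldl (fun a (i : Nat) => (a.set i (S i)).set (i + h) (D i))
      (List.replicate (2*h) ([] : List Int))
    = (List.range h).map S ++ (List.range h).map D := by
  have aux : ∀ m, m ≤ h →
      (List.range m).foldl (fun a (i : Nat) => (a.set i (S i)).set (i + h) (D i))
        (List.replicate (2*h) ([] : List Int))
      = (List.range (2*h)).map (fun j =>
          if j < m then S j else if h ≤ j ∧ j - h < m then D (j - h) else []) := by
    intro m hm
    induction m with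
    | zero => apply List.ext_getElem <;> simp
    | succ m ih =>
      rw [List.range_succ, List.foldl_append, ih (by omega)]
      simp only [List.foldl_cons, List.foldl_nil]
      rw [set_map_range, set_map_range]
      apply List.map_congr_left
      intro j hj
      have hj2 : j < 2*h := List.mem_range.mp hj
      split_ifs <;> first | rfl | (congr 1; omega)
  rw [aux h (le_refl h)]
  rw [show 2*h = h + h by omega, List.range_add, List.map_append, List.map_map]
  congr 1
  · apply List.map_congr_left
    intro j hj
    have := List.mem_range.mp hj
    rw [if_pos (by omega)]
  · apply List.map_congr_left
    intro j hj
    have := List.mem_range.mp hj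
    simp only [Function.comp]
    rw [if_neg (by omega), if_pos (by omega), show h + j - h = j by omega]

-- fftA on a list of length 2^(k+1), unfolded to its closed combine form
lemma fftA_succ (k : Nat) (f : List (List Int)) (xi p : Int) (hf : f.length = 2^(k+1)) :
    fftA f xi p =
      (List.range (2^k)).map (fun i =>
        sumarA ((fftA ((List.range (2^k)).map (fun i => f.getD (2*i) [])) (xi*2) p).getD i [])
          (rotarA ((fftA ((List.range (2^k)).map (fun i => f.getD (2*i+1) [])) (xi*2) p).getD i []) ((i : Int) * xi)) p) ++
      (List.range (2^k)).map (fun i =>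
        restarA ((fftA ((List.range (2^k)).map (fun i => f.getD (2*i) [])) (xi*2) p).getD i [])
          (rotarA ((fftA ((List.range (2^k)).map (fun i => f.getD (2*i+1) [])) (xi*2) p).getD i []) ((i : Int) * xi)) p) := by
  conv_lhs => rw [fftA]
  simp only [hf]
  rw [if_neg (by have := Nat.one_lt_two_pow_iff.mpr (by omega : k+1 ≠ 0); omega),
      if_neg (by have := Nat.one_lt_two_pow_iff.mpr (by omega : k+1 ≠ 0); omega)]
  rw [show (2:Nat)^(k+1)/2 = 2^k by omega]
  rw [show (2:Nat)^(k+1) = 2*2^k by ring]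
  exact combine_eq (2^k) _ _

lemma getD_mem {α : Type} (l : List α) (d : α) (i : Nat) (h : i < l.length) : l.getD i d ∈ l := by
  rw [List.getD_eq_getElem l d h]
  exact List.getElem_mem h

lemma length_sumarA (f g : List Int) (p : Int) : (sumarA f g p).length = f.length := by
  rw [sumarA_eq_map]; simp

lemma length_restarA (f g : List Int) (p : Int) : (restarA f g p).length = f.length := by
  rw [restarA_eq_map]; simp

lemma fftA_rows (k : Nat) : ∀ (f : List (List Int)) (xi p : Int) (L : Nat),
    f.length = 2^k → (∀ r ∈ f, r.length = L) →
    (fftA f xi p).length = 2^k ∧ (∀ r ∈ fftA f xi p, r.length = L) := by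
  induction k with
  | zero =>
    intro f xi p L hf hr
    rw [fftA, hf]
    simp only [pow_zero, if_pos]
    exact ⟨hf, hr⟩
  | succ k ih =>
    intro f xi p L hf hr
    rw [fftA_succ k f xi p hf]
    set pe := (List.range (2^k)).map (fun i => f.getD (2*i) []) with hpe
    set po := (List.range (2^k)).map (fun i => f.getD (2*i+1) []) with hpo
    have hpeL : ∀ r ∈ pe, r.length = L := by
      intro r hrm
      rw [hpe] at hrm
      obtain ⟨i, hi, he⟩ := List.mem_map.mp hrm
      have hi2 : 2*i < f.length := by
        have := List.mem_range.mp hi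
        rw [hf]; have : 2^(k+1) = 2*2^k := by ring
        omega
      exact he ▸ hr _ (getD_mem _ _ _ hi2)
    have hpoL : ∀ r ∈ po, r.length = L := by
      intro r hrm
      rw [hpo] at hrm
      obtain ⟨i, hi, he⟩ := List.mem_map.mp hrm
      have hi2 : 2*i+1 < f.length := by
        have := List.mem_range.mp hi
        rw [hf]; have : 2^(k+1) = 2*2^k := by ring
        omega
      exact he ▸ hr _ (getD_mem _ _ _ hi2)
    obtain ⟨haeL, haeR⟩ := ih pe (xi*2) p L (by rw [hpe]; simp) hpeL
    obtain ⟨haoL, haoR⟩ := ih po (xi*2) p L (by rw [hpo]; simp) hpoL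
    constructor
    · simp only [List.length_append, List.length_map, List.length_range]
      ring
    · intro r hrm
      rcases List.mem_append.mp hrm with hm | hm <;> obtain ⟨i, hi, he⟩ := List.mem_map.mp hm
      · rw [← he, length_sumarA]
        have hi2 := List.mem_range.mp hi
        exact haeR _ (getD_mem _ _ _ (by omega))
      · rw [← he, length_restarA]
        have hi2 := List.mem_range.mp hi
        exact haeR _ (getD_mem _ _ _ (by omega))

def rl : Nat → List Nat
  | 0 => [0]
  | k+1 => (rl k).map (fun r => 2*r) ++ (rl k).map (fun r => 2*r+1)

lemma length_rl (k : Nat) : (rl k).length = 2^k := by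
  induction k with
  | zero => rfl
  | succ k ih => simp [rl, ih]; ring

lemma rl_lt (k : Nat) : ∀ x ∈ rl k, x < 2^k := by
  induction k with
  | zero => simp [rl]
  | succ k ih =>
    intro x hx
    simp only [rl, List.mem_append, List.mem_map] at hx
    have hp : 2^(k+1) = 2*2^k := by ring
    rcases hx with ⟨r, hr, he⟩ | ⟨r, hr, he⟩ <;> (have := ih r hr; omega)

lemma revLoop_eq (k : Nat) : ∀ j, j ≤ k → revLoop (rl j) (2^k) = rl k := by
  intro j hj
  induction hk : k - j generalizing j with
  | zero =>
    have : j = k := by omega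
    subst this
    rw [revLoop, dif_neg (by simp [length_rl])]
  | succ m ih =>
    rw [revLoop, dif_pos ?_]
    · have hrl : (rl j).map (fun r => 2*r) ++ (rl j).map (fun r => 2*r+1) = rl (j+1) := rfl
      rw [hrl]
      exact ih (j+1) (by omega) (by omega)
    · constructor
      · rw [length_rl]; positivity
      · rw [length_rl]; exact Nat.pow_lt_pow_right (by omega) (by omega)

lemma blocksB_nil (m : Nat) (step p : Int) : blocksB [] m step p = [] := by
  rw [blocksB, dif_pos (Or.inl rfl)]

lemma length_blocksB (m : Nat) (hm : 0 < m) (step p : Int) :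
    ∀ (q : Nat) (rest : List (List Int)), rest.length = 2*m*q →
    (blocksB rest m step p).length = rest.length := by
  intro q
  induction q with
  | zero =>
    intro rest hlen
    have : rest = [] := List.length_eq_zero_iff.mp (by omega)
    subst this
    rw [blocksB, dif_pos (Or.inl rfl)]
  | succ q ih =>
    intro rest hlen
    have hx : rest.length = 2*m*q + 2*m := by rw [hlen]; ring
    have hne : rest ≠ [] := by
      intro hc; rw [hc] at hx; simp at hx; omega
    rw [blocksB, dif_neg (by simp [hne]; omega)]
    simp only [List.length_append, List.length_map, List.length_zip, List.length_take,
      List.length_drop, List.length_zipIdx]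
    rw [ih (rest.drop (2*m)) (by simp; omega)]
    simp
    omega

lemma blocksB_append (m : Nat) (hm : 0 < m) (step p : Int) :
    ∀ (q : Nat) (a1 a2 : List (List Int)), a1.length = 2*m*q →
    blocksB (a1 ++ a2) m step p = blocksB a1 m step p ++ blocksB a2 m step p := by
  intro q
  induction q with
  | zero =>
    intro a1 a2 hlen
    have : a1 = [] := List.length_eq_zero_iff.mp (by omega)
    subst this
    simp [blocksB_nil]
  | succ q ih =>
    intro a1 a2 hlen
    have hx : a1.length = 2*m*q + 2*m := by rw [hlen]; ring
    have hne : a1 ≠ [] := by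
      intro hc; rw [hc] at hx; simp at hx; omega
    have h2m : 2*m ≤ a1.length := by omega
    conv_lhs => rw [blocksB]
    rw [dif_neg (by simp [hne]; omega)]
    conv_rhs => rw [blocksB]
    rw [dif_neg (by simp [hne]; omega)]
    rw [List.take_append_of_le_length (by omega), List.drop_append_of_le_length (by omega),
        List.take_append_of_le_length (by simp; omega), List.drop_append_of_le_length (by omega)]
    rw [ih (a1.drop (2*m)) a2 (by simp; omega)]
    simp [List.append_assoc]

-- the single final butterfly stage equals A's combine, given equal-length rows
lemma blocksB_final (h : Nat) (hh : 0 < h) (e o : List (List Int)) (xi p : Int) (L : Nat)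
    (he : e.length = h) (ho : o.length = h)
    (hre : ∀ r ∈ e, r.length = L) (hro : ∀ r ∈ o, r.length = L) :
    blocksB (e ++ o) h xi p
    = (List.range h).map (fun i => sumarA (e.getD i []) (rotarA (o.getD i []) ((i : Int) * xi)) p) ++
      (List.range h).map (fun i => restarA (e.getD i []) (rotarA (o.getD i []) ((i : Int) * xi)) p) := by
  have hne : e ++ o ≠ [] := by
    intro hc
    have := congrArg List.length hc
    simp [he] at this
    omega
  conv_lhs => rw [blocksB]
  rw [dif_neg (by simp [hne]; omega)]
  have hu : (e ++ o).take h = e := by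
    rw [List.take_append_of_le_length (by omega), ← he, List.take_length]
  have hv : ((e ++ o).drop h).take h = o := by
    rw [List.drop_append_of_le_length (by omega), List.drop_eq_nil_of_le (by omega),
        List.nil_append, ← ho, List.take_length]
  have hrest : (e ++ o).drop (2*h) = [] := List.drop_eq_nil_of_le (by simp; omega)
  rw [hu, hv, hrest, blocksB_nil, List.append_nil]
  have hzl : (e.zip ((o.zipIdx.map (fun yi => rotarB yi.1 ((yi.2 : Int) * xi))))).length = h := by
    simp [he, ho]
  congr 1
  all_goals
    apply List.ext_getElem
    · simp [he, ho]
    · intro i hi hi2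
      rw [List.length_map, hzl] at hi
      simp only [List.getElem_map, List.getElem_zip, List.getElem_zipIdx, List.getElem_range]
      rw [List.getD_eq_getElem e [] (by omega), List.getD_eq_getElem o [] (by omega)]
      have hlen : (e[i]'(by omega)).length ≤ (rotarB (o[i]'(by omega)) ((i : Int) * xi)).length := by
        rw [length_rotarB, hre _ (List.getElem_mem _), hro _ (List.getElem_mem _)]
      rw [rotar_eq]
      first
        | rw [sumar_eq _ _ _ hlen]; simp
        | rw [restar_eq _ _ _ hlen]; simp

lemma stagesB_stop (a : List (List Int)) (n m : Nat) (xi p : Int) (h : ¬(0 < m ∧ m < n)) :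
    stagesB a n m xi p = a := by
  rw [stagesB, dif_neg h]

lemma stagesB_step (a : List (List Int)) (n m : Nat) (xi p : Int) (h : 0 < m ∧ m < n) :
    stagesB a n m xi p = stagesB (blocksB a m (xi * ((n/(2*m) : Nat) : Int)) p) n (2*m) xi p := by
  rw [stagesB, dif_pos h]

lemma stages_split (k : Nat) (xi p : Int) :
    ∀ (j : Nat) (x1 x2 : List (List Int)), j ≤ k → x1.length = 2^k → x2.length = 2^k →
    stagesB (x1 ++ x2) (2^(k+1)) (2^j) xi p
    = blocksB (stagesB x1 (2^k) (2^j) (xi*2) p ++ stagesB x2 (2^k) (2^j) (xi*2) p) (2^k) xi p := by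
  intro j x1 x2 hj h1 h2
  induction hd : k - j generalizing j x1 x2 with
  | zero =>
    have hjk : j = k := by omega
    subst hjk
    rw [stagesB_step (x1 ++ x2) (2^(j+1)) (2^j) xi p
        ⟨by positivity, Nat.pow_lt_pow_right (by omega) (by omega)⟩]
    rw [stagesB_stop _ _ _ _ _ (by have hp : 2*2^j = 2^(j+1) := (by ring); omega)]
    rw [stagesB_stop _ _ _ _ _ (by omega), stagesB_stop _ _ _ _ _ (by omega)]
    have hstep : (2:Nat)^(j+1)/(2*2^j) = 1 := by
      rw [show 2*2^j = 2^(j+1) by ring]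
      exact Nat.div_self (by positivity)
    rw [hstep]
    norm_num
  | succ d ih =>
    have hjk : j < k := by omega
    have hq : (2:Nat)*2^j*2^(k-j-1) = 2^k := by
      rw [show (2:Nat)*2^j = 2^(j+1) by ring, ← pow_add]
      congr 1
      omega
    have hposj : (0:Nat) < 2^j := by positivity
    rw [stagesB_step (x1 ++ x2) (2^(k+1)) (2^j) xi p
        ⟨hposj, Nat.pow_lt_pow_right (by omega) (by omega)⟩]
    rw [stagesB_step x1 (2^k) (2^j) (xi*2) p
        ⟨hposj, Nat.pow_lt_pow_right (by omega) (by omega)⟩]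
    rw [stagesB_step x2 (2^k) (2^j) (xi*2) p
        ⟨hposj, Nat.pow_lt_pow_right (by omega) (by omega)⟩]
    have hstep : xi * (((2^(k+1)/(2*2^j) : Nat)) : Int) = (xi*2) * (((2^k/(2*2^j) : Nat)) : Int) := by
      rw [show (2:Nat)*2^j = 2^(j+1) by ring,
          Nat.pow_div (by omega) (by omega), Nat.pow_div (by omega) (by omega)]
      push_cast
      rw [show (2:Int)^(k-j) = 2 * 2^(k-(j+1)) by rw [← pow_succ']; congr 1; omega]
      ring
    rw [hstep]
    rw [blocksB_append (2^j) hposj ((xi*2) * (((2^k/(2*2^j) : Nat)) : Int)) p (2^(k-j-1)) x1 x2 (by rw [h1, ← hq])]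
    rw [show (2:Nat)*2^j = 2^(j+1) by ring]
    exact ih (j+1) _ _ (by omega)
      (by rw [length_blocksB (2^j) hposj _ _ (2^(k-j-1)) x1 (by rw [h1, ← hq]), h1])
      (by rw [length_blocksB (2^j) hposj _ _ (2^(k-j-1)) x2 (by rw [h2, ← hq]), h2])
      (by omega)

lemma fft_main (k : Nat) : ∀ (f : List (List Int)) (xi p : Int) (L : Nat),
    f.length = 2^k → (∀ r ∈ f, r.length = L) →
    fftB f xi p = fftA f xi p := by
  induction k with
  | zero =>
    intro f xi p L hf hr
    obtain ⟨r, hfr⟩ := List.length_eq_one_iff.mp (by rw [hf, pow_zero])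
    subst hfr
    simp only [fftB]
    rw [stagesB_stop _ _ _ _ _ (by simp)]
    rw [show List.length [r] = 2^0 by simp]
    rw [show ([0] : List Nat) = rl 0 from rfl, revLoop_eq 0 0 (le_refl 0)]
    rw [fftA]
    simp [rl]
  | succ k ih =>
    intro f xi p L hf hr
    set pe := (List.range (2^k)).map (fun i => f.getD (2*i) []) with hpe
    set po := (List.range (2^k)).map (fun i => f.getD (2*i+1) []) with hpo
    have hpelen : pe.length = 2^k := by rw [hpe]; simp
    have hpolen : po.length = 2^k := by rw [hpo]; simp
    have hpeL : ∀ r ∈ pe, r.length = L := by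
      intro r hrm
      rw [hpe] at hrm
      obtain ⟨i, hi, he⟩ := List.mem_map.mp hrm
      have hi2 : 2*i < f.length := by
        have := List.mem_range.mp hi
        rw [hf]; have : 2^(k+1) = 2*2^k := by ring
        omega
      exact he ▸ hr _ (getD_mem _ _ _ hi2)
    have hpoL : ∀ r ∈ po, r.length = L := by
      intro r hrm
      rw [hpo] at hrm
      obtain ⟨i, hi, he⟩ := List.mem_map.mp hrm
      have hi2 : 2*i+1 < f.length := by
        have := List.mem_range.mp hi
        rw [hf]; have : 2^(k+1) = 2*2^k := by ring
        omega
      exact he ▸ hr _ (getD_mem _ _ _ hi2)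
    have hX : (rl (k+1)).map (fun r => f.getD r []) =
        (rl k).map (fun r => pe.getD r []) ++ (rl k).map (fun r => po.getD r []) := by
      have hstep : rl (k+1) = (rl k).map (fun r => 2*r) ++ (rl k).map (fun r => 2*r+1) := rfl
      rw [hstep, List.map_append, List.map_map, List.map_map]
      congr 1
      · apply List.map_congr_left
        intro r hrm
        have hrlt := rl_lt k r hrm
        simp only [Function.comp]
        rw [List.getD_eq_getElem pe _ (by omega)]
        simp [hpe]
      · apply List.map_congr_left
        intro r hrm
        have hrlt := rl_lt k r hrm
        simp only [Function.comp]
        rw [List.getD_eq_getElem po _ (by omega)]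
        simp [hpo]
    simp only [fftB]
    rw [hf, show ([0] : List Nat) = rl 0 from rfl, revLoop_eq (k+1) 0 (by omega), hX]
    have hs := stages_split k xi p 0 ((rl k).map (fun r => pe.getD r []))
      ((rl k).map (fun r => po.getD r [])) (by omega) (by simp [length_rl]) (by simp [length_rl])
    simp only [pow_zero] at hs
    rw [hs]
    have hb1 : fftB pe (xi*2) p = stagesB ((rl k).map (fun r => pe.getD r [])) (2^k) 1 (xi*2) p := by
      simp only [fftB]
      rw [hpelen, show ([0] : List Nat) = rl 0 from rfl, revLoop_eq k 0 (by omega)]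
    have hb2 : fftB po (xi*2) p = stagesB ((rl k).map (fun r => po.getD r [])) (2^k) 1 (xi*2) p := by
      simp only [fftB]
      rw [hpolen, show ([0] : List Nat) = rl 0 from rfl, revLoop_eq k 0 (by omega)]
    rw [← hb1, ← hb2, ih pe (xi*2) p L hpelen hpeL, ih po (xi*2) p L hpolen hpoL]
    obtain ⟨haeL, haeR⟩ := fftA_rows k pe (xi*2) p L hpelen hpeL
    obtain ⟨haoL, haoR⟩ := fftA_rows k po (xi*2) p L hpolen hpoL
    rw [blocksB_final (2^k) (by positivity) _ _ xi p L haeL haoL haeR haoR]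
    rw [← fftA_succ k f xi p hf]

lemma foldl_set_getD_map {α : Type} (l : List α) (d : α) (G : α → α) :
    (List.range l.length).foldl (fun t (i : Nat) => t.set i (G (t.getD i d))) l = l.map G := by
  have aux : ∀ m, m ≤ l.length →
      (List.range m).foldl (fun t (i : Nat) => t.set i (G (t.getD i d))) l
      = (l.take m).map G ++ l.drop m := by
    intro m hm
    induction m with
    | zero => simp
    | succ m ih =>
      rw [List.range_succ, List.foldl_append, ih (by omega)]
      simp only [List.foldl_cons, List.foldl_nil]
      have hmlt : m < l.length := by omega
      have hlen : ((l.take m).map G).length = m := by simp; omega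
      rw [List.drop_eq_getElem_cons hmlt]
      rw [List.set_append, if_neg (by omega)]
      have hgd : (((l.take m).map G) ++ l[m] :: l.drop (m+1)).getD m d = l[m] := by
        rw [List.getD_eq_getElem _ _ (by simp; omega)]
        rw [List.getElem_append_right (by omega)]
        simp only [hlen, Nat.sub_self, List.getElem_cons_zero]
      rw [hgd, hlen, Nat.sub_self]
      simp only [List.set_cons_zero]
      rw [List.take_add_one, List.getElem?_eq_getElem hmlt]
      simp
      rw [List.take_add_one, List.getElem?_map, List.getElem?_eq_getElem hmlt]
      simp
  rw [aux l.length (le_refl _)]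
  simp


-- ===== VERDICT (by name: the statement is the Claim_ definition above) =====
theorem ifft_adaptado_spec : Claim_equal_ifft_adaptado := by
  intro a xi p hdom hpre
  obtain ⟨hne, hdvd, hrows, hp0, hodd⟩ := hpre
  obtain ⟨k, hk, hlen⟩ := (Nat.dvd_prime_pow Nat.prime_two).mp hdvd
  unfold Spec_ifft_adaptado
  simp only [ifft_adaptado, ifft_adaptado_alt]
  have hT : fftB a (-xi) p = fftA a (-xi) p :=
    fft_main k a (-xi) p (a.headD []).length hlen hrows
  rw [hT]
  obtain ⟨hTlen, hTrows⟩ := fftA_rows k a (-xi) p (a.headD []).length hlen hrows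
  have hTlen' : a.length = (fftA a (-xi) p).length := by rw [hTlen, hlen]
  have hhead : a.getD 0 [] = a.headD [] := by
    cases a with
    | nil => exact absurd rfl hne
    | cons x t => rfl
  rw [hhead, hTlen']
  rw [foldl_set_getD_map (fftA a (-xi) p) ([] : List Int)
      (fun r0 => (List.range (a.headD []).length).foldl
        (fun row j => row.set j (PySem.Int.mod (row.getD j 0 * pyModInv (((fftA a (-xi) p).length : Nat) : Int) p) p)) r0)]
  apply List.map_congr_left
  intro row hrow
  have hrl : row.length = (a.headD []).length := hTrows row hrow
  rw [show (a.headD []).length = row.length from hrl.symm]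
  exact foldl_set_getD_map row 0
    (fun c => PySem.Int.mod (c * pyModInv (((fftA a (-xi) p).length : Nat) : Int) p) p)
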